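/- GENERATED by c/gen_decode.py: decode facts of the image, one per distinct instruction byte string. -/
import UserX.DecodeImage

#decode_all Vorbis.Dec
  "0f570d0d660100"  -- xorps xmm1,XMMWORD PTR [rip+0x1660d]
  "0f84a0000000"  -- je 10b2ae
  "0f8562ffffff"  -- jne 10930d
  "0f8d6b010000"  -- jge 10fa8d
  "0fafd9"  -- imul ebx,ecx
  "0fbfed"  -- movsx ebp,bp
  "3c4f"  -- cmp al,0x4f
  "410fb6cc"  -- movzx ecx,r12b
  "4181fdffffff0f"  -- cmp r13d,0xfffffff
  "4189ae40080000"  -- mov DWORD PTR [r14+0x840],ebp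
  "418d4601"  -- lea eax,[r14+0x1]
  "41d3fd"  -- sar r13d,cl
  "440fbfe0"  -- movsx r12d,ax
  "44886301"  -- mov BYTE PTR [rbx+0x1],r12b
  "4489a3e4060000"  -- mov DWORD PTR [rbx+0x6e4],r12d
  "448b65b0"  -- mov r12d,DWORD PTR [rbp-0x50]
  "448d2c00"  -- lea r13d,[rax+rax*1]
  "45886c2407"  -- mov BYTE PTR [r12+0x7],r13b
  "458b7e08"  -- mov r15d,DWORD PTR [r14+0x8]
  "480fafe8"  -- imul rbp,rax
  "4863ea"  -- movsxd rbp,edx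
  "4883e0f0"  -- and rax,0xfffffffffffffff0
  "48895dc0"  -- mov QWORD PTR [rbp-0x40],rbx
  "488b34eb"  -- mov rsi,QWORD PTR [rbx+rbp*8]
  "488b8560ffffff"  -- mov rax,QWORD PTR [rbp-0xa0]
  "488d4c2450"  -- lea rcx,[rsp+0x50]
  "488d7c1500"  -- lea rdi,[rbp+rdx*1+0x0]
  "488dbb35060000"  -- lea rdi,[rbx+0x635]
  "488dbd38010000"  -- lea rdi,[rbp+0x138]
  "48c7042528f01f0001000000"  -- mov QWORD PTR ds:0x1ff028,0x1
  "49036c2410"  -- add rbp,QWORD PTR [r12+0x10]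
  "4983ed10"  -- sub r13,0x10
  "498d3c5e"  -- lea rdi,[r14+rbx*2]
  "498dae40080000"  -- lea rbp,[r14+0x840]
  "4a8944fd08"  -- mov QWORD PTR [rbp+r15*8+0x8],rax
  "4c01f0"  -- add rax,r14
  "4c896c2418"  -- mov QWORD PTR [rsp+0x18],r13
  "4c8b6c2408"  -- mov r13,QWORD PTR [rsp+0x8]
  "4c8d4db0"  -- lea r9,[rbp-0x50]
  "4d69f648080000"  -- imul r14,r14,0x848
  "4e8d2c81"  -- lea r13,[rcx+r8*4]
  "660f7ec5"  -- movd ebp,xmm0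
  "6642895c6504"  -- mov WORD PTR [rbp+r12*2+0x4],bx
  "7318"  -- jae 104a53
  "746a"  -- je 10c354
  "75c6"  -- jne 1115c8
  "7cd1"  -- jl 113efe
  "7f0c"  -- jg 103ef7
  "81fb02fcffff"  -- cmp ebx,0xfffffc02
  "83e806"  -- sub eax,0x6
  "894c240c"  -- mov DWORD PTR [rsp+0xc],ecx
  "89ab8c000000"  -- mov DWORD PTR [rbx+0x8c],ebp
  "8b44244c"  -- mov eax,DWORD PTR [rsp+0x4c]
  "8b838c000000"  -- mov eax,DWORD PTR [rbx+0x8c]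
  "8d5001"  -- lea edx,[rax+0x1]
  "be1e000000"  -- mov esi,0x1e
  "c744240802000000"  -- mov DWORD PTR [rsp+0x8],0x2
  "c783ec06000000000000"  -- mov DWORD PTR [rbx+0x6ec],0x0
  "e8063affff"  -- call 100300
  "e80f8effff"  -- call 100800
  "e81962ffff"  -- call 10b100
  "e82346ffff"  -- call 100720
  "e82c6bffff"  -- call 1025c0
  "e8367effff"  -- call 100640
  "e84171ffff"  -- call 1089c0
  "e84af6feff"  -- call 100300
  "e8566effff"  -- call 10d1c0
  "e863a6feff"  -- call 100640
  "e86ebdfeff"  -- call 1008e0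
  "e879feffff"  -- call 107500
  "e88591ffff"  -- call 100800
  "e88fc0feff"  -- call 100640
  "e899aeffff"  -- call 100640
  "e8a49ffeff"  -- call 1003c0
  "e8aee3feff"  -- call 103d00
  "e8b83effff"  -- call 100720
  "e8c2b6feff"  -- call 100300
  "e8cbeffeff"  -- call 100300
  "e8d68effff"  -- call 10d1c0
  "e8e0b4feff"  -- call 100640
  "e8e9feffff"  -- call 104c60
  "e8f1b3ffff"  -- call 100640
  "e8fd27ffff"  -- call 100640
  "e934f6ffff"  -- jmp 113b22
  "e979010000"  -- jmp 115092
  "e9d1fcffff"  -- jmp 113b22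
  "eb33"  -- jmp 101354
  "ebc1"  -- jmp 10d66d
  "f20f110424"  -- movsd QWORD PTR [rsp],xmm0
  "f20f59cc"  -- mulsd xmm1,xmm4
  "f30f103c24"  -- movss xmm7,DWORD PTR [rsp]
  "f30f1065a8"  -- movss xmm4,DWORD PTR [rbp-0x58]
  "f30f11442404"  -- movss DWORD PTR [rsp+0x4],xmm0
  "f30f1165a8"  -- movss DWORD PTR [rbp-0x58],xmm4
  "f30f5845e4"  -- addss xmm0,DWORD PTR [rbp-0x1c]
  "f30f596b14"  -- mulss xmm5,DWORD PTR [rbx+0x14]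
  "f30f5ce0"  -- subss xmm4,xmm0
  "f3410f114500"  -- movss DWORD PTR [r13+0x0],xmm0
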